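-- pv_equiv track=rewrite | github.com/royerz2/Pan-Cancer-X-Node-Target-Discovery-System | run_dual_vs_triple_validation.py | count_escape_routes
-- ===== SOURCE A (Python) =====
-- def count_escape_routes(adj, rev_adj, cancer_mechs, inhibited_targets,
--                         essential_genes, max_depth=4):
--     """Count signaling paths that bypass inhibited targets.
--
--     An escape route is a path from any uninhibited essential gene to any
--     downstream effector (cell cycle, apoptosis, survival) that does not
--     pass through any inhibited target.
--
--     Parameters
--     ----------
--     adj : dict  - forward adjacency
--     rev_adj : dict - reverse adjacency
--     cancer_mechs : list - survival mechanisms for this cancer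
--     inhibited_targets : set - targets being inhibited
--     essential_genes : set - essential genes for this cancer
--     max_depth : int - max path length for escape routes
--     """
--     # Define effector categories (downstream outputs)
--     effectors = {
--         'survival': {'BCL2', 'BCL2L1', 'MCL1', 'BIRC5', 'XIAP'},
--         'proliferation': {'MYC', 'CCND1', 'CCNE1', 'CDK2', 'CDK4', 'CDK6', 'E2F1'},
--         'signaling': {'AKT1', 'AKT2', 'MTOR', 'ERK1', 'ERK2', 'MAPK1', 'MAPK3'},
--     }
--     all_effectors = set.union(*effectors.values())
--
--     # Source nodes: essential genes not inhibited
--     sources = essential_genes - inhibited_targets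
--
--     # BFS from each source, avoiding inhibited targets
--     escape_routes = []
--     for source in sources:
--         visited = {source}
--         queue = [(source, [source])]
--         while queue:
--             node, path = queue.pop(0)
--             if len(path) > max_depth:
--                 continue
--             for neighbor in adj.get(node, set()):
--                 if neighbor in inhibited_targets:
--                     continue  # blocked
--                 if neighbor in visited:
--                     continue
--                 new_path = path + [neighbor]
--                 visited.add(neighbor)
--                 if neighbor in all_effectors:
--                     escape_routes.append(new_path)
--                 else:
--                     queue.append((neighbor, new_path))
--
--     return escape_routes
-- ===== SOURCE B (Python) =====
-- def count_escape_routes(adj, rev_adj, cancer_mechs, inhibited_targets,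
--                         essential_genes, max_depth=4):
--     """Same escape-route enumeration, but the BFS queue holds bare nodes and a
--     parent/depth map is kept; each route is reconstructed from parent pointers
--     after the BFS, so no per-edge path copying is done."""
--     effectors = {
--         'survival': {'BCL2', 'BCL2L1', 'MCL1', 'BIRC5', 'XIAP'},
--         'proliferation': {'MYC', 'CCND1', 'CCNE1', 'CDK2', 'CDK4', 'CDK6', 'E2F1'},
--         'signaling': {'AKT1', 'AKT2', 'MTOR', 'ERK1', 'ERK2', 'MAPK1', 'MAPK3'},
--     }
--     all_effectors = set.union(*effectors.values())
--
--     sources = essential_genes - inhibited_targets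
--
--     escape_routes = []
--     for source in sources:
--         visited = {source}
--         parent = {}
--         depth = {source: 1}          # depth = number of nodes on the route
--         queue = [source]
--         found = []                   # effectors, in discovery order
--         while queue:
--             node = queue.pop(0)
--             d = depth[node]
--             if d > max_depth:
--                 continue
--             for neighbor in adj.get(node, set()):
--                 if neighbor in inhibited_targets or neighbor in visited:
--                     continue
--                 visited.add(neighbor)
--                 parent[neighbor] = node
--                 depth[neighbor] = d + 1
--                 if neighbor in all_effectors:
--                     found.append(neighbor)
--                 else:
--                     queue.append(neighbor)
--         for eff in found:
--             path = [eff]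
--             cur = eff
--             while cur != source:
--                 cur = parent[cur]
--                 path.append(cur)
--             path.reverse()
--             escape_routes.append(path)
--     return escape_routes
-- ===== Notes on version B (the rewrite author's own statement) =====
-- stated objective: alternative
-- what changed: Instead of enqueuing whole paths and copying path+[neighbor] on every edge, B's BFS queue holds bare nodes with parent/depth dictionaries, and each escape route is reconstructed once from parent pointers after the BFS in effector-discovery order.
import Mathlib
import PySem

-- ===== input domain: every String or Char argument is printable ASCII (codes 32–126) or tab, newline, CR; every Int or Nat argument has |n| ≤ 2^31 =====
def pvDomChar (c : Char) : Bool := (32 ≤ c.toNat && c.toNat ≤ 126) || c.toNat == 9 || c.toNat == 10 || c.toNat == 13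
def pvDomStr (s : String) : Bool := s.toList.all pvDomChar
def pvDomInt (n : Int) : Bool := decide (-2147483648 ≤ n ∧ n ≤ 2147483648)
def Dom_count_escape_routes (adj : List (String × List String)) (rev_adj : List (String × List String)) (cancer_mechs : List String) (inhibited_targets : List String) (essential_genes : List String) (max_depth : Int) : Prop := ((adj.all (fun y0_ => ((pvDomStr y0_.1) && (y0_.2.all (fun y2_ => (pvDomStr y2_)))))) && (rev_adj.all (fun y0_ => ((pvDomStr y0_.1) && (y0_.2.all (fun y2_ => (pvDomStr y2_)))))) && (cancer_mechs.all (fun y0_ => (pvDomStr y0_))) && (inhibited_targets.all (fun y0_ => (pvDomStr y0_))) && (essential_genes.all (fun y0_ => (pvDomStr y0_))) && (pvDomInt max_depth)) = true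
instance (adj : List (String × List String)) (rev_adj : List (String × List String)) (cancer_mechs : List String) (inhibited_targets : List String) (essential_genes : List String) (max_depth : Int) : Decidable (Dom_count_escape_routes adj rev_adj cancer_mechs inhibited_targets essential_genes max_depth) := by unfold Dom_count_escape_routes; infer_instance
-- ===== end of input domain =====

-- ===== PORT A =====
-- Header: B replaces A's path-carrying BFS queue by a bare-node queue with parent/depth
-- dictionaries, reconstructing routes from parent pointers afterwards (alternative decomposition).
-- all_effectors = set.union(survival, proliferation, signaling); only used for membership tests.
def pvEffectorsUnion : PySem.Set String :=
  PySem.Set.union (PySem.Set.union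
      (PySem.Set.ofList ["BCL2","BCL2L1","MCL1","BIRC5","XIAP"])
      (PySem.Set.ofList ["MYC","CCND1","CCNE1","CDK2","CDK4","CDK6","E2F1"]))
    (PySem.Set.ofList ["AKT1","AKT2","MTOR","ERK1","ERK2","MAPK1","MAPK3"])

-- body of A's inner `for neighbor in adj.get(node, set())` loop; state = (visited, queue, escape_routes)
def pvStepA (inh : List String) (path : List String)
    (st : PySem.Set String × List (String × List String) × List (List String)) (neighbor : String) :
    PySem.Set String × List (String × List String) × List (List String) :=
  if PySem.Set.contains inh neighbor then st
  else if PySem.Set.contains st.1 neighbor then st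
  else
    let new_path := path ++ [neighbor]
    if PySem.Set.contains pvEffectorsUnion neighbor then
      (PySem.Set.add st.1 neighbor, st.2.1, st.2.2 ++ [new_path])
    else
      (PySem.Set.add st.1 neighbor, st.2.1 ++ [(neighbor, new_path)], st.2.2)

-- A's `while queue:` loop; fuel only makes the recursion total (each Python iteration pops one
-- ever-enqueued item, and at most 1 + (number of adjacency values) items are ever enqueued).
def pvBfsA (adjd : PySem.Dict String (List String)) (inh : List String) (md : Int) :
    Nat → PySem.Set String → List (String × List String) → List (List String) → List (List String)
  | 0, _, _, routes => routes
  | _+1, _, [], routes => routes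
  | fuel+1, visited, (node, path) :: rest, routes =>
    if (path.length : Int) > md then
      pvBfsA adjd inh md fuel visited rest routes
    else
      let st := (adjd.getD node []).foldl (pvStepA inh path) (visited, rest, routes)
      pvBfsA adjd inh md fuel st.1 st.2.1 st.2.2

def count_escape_routes (adj : List (String × List String)) (rev_adj : List (String × List String)) (cancer_mechs : List String) (inhibited_targets : List String) (essential_genes : List String) (max_depth : Int) : List (List String) :=
  let adjd := PySem.Dict.mk adj
  let sources := PySem.Set.diff (PySem.Set.ofList essential_genes) inhibited_targets
  let fuel := (adj.flatMap (fun p => p.2)).length + 1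
  sources.foldl (fun routes source =>
    pvBfsA adjd inhibited_targets max_depth fuel
      (PySem.Set.add PySem.Set.empty source) [(source, [source])] routes) []

-- ===== PORT B =====
-- body of B's inner loop; state = (visited, parent, depth, queue, found)
def pvStepB (inh : List String) (node : String) (d : Int)
    (st : PySem.Set String × PySem.Dict String String × PySem.Dict String Int × List String × List String)
    (neighbor : String) :
    PySem.Set String × PySem.Dict String String × PySem.Dict String Int × List String × List String :=
  if PySem.Set.contains inh neighbor || PySem.Set.contains st.1 neighbor then st
  else
    let vis' := PySem.Set.add st.1 neighbor
    let par' := st.2.1.insert neighbor node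
    let dep' := st.2.2.1.insert neighbor (d + 1)
    if PySem.Set.contains pvEffectorsUnion neighbor then
      (vis', par', dep', st.2.2.2.1, st.2.2.2.2 ++ [neighbor])
    else
      (vis', par', dep', st.2.2.2.1 ++ [neighbor], st.2.2.2.2)

-- B's `while queue:` loop over bare nodes; returns (visited, parent, found)
def pvBfsB (adjd : PySem.Dict String (List String)) (inh : List String) (md : Int) :
    Nat → PySem.Set String → PySem.Dict String String → PySem.Dict String Int → List String → List String →
    PySem.Set String × PySem.Dict String String × List String
  | 0, visited, parent, _, _, found => (visited, parent, found)
  | _+1, visited, parent, _, [], found => (visited, parent, found)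
  | fuel+1, visited, parent, depth, node :: rest, found =>
    let d := depth.getD node 0
    if d > md then pvBfsB adjd inh md fuel visited parent depth rest found
    else
      let st := (adjd.getD node []).foldl (pvStepB inh node d) (visited, parent, depth, rest, found)
      pvBfsB adjd inh md fuel st.1 st.2.1 st.2.2.1 st.2.2.2.1 st.2.2.2.2

-- B's route reconstruction: `path=[eff]; while cur != source: cur=parent[cur]; path.append(cur); path.reverse()`
-- (fuel bounds the walk; |visited| steps always suffice since a parent chain never repeats a node)
def pvWalk (parent : PySem.Dict String String) (source : String) :
    Nat → String → List String → List String
  | 0, _, path => path.reverse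
  | fuel+1, cur, path =>
    if cur == source then path.reverse
    else
      match parent.get? cur with
      | none => path.reverse
      | some p => pvWalk parent source fuel p (path ++ [p])

def count_escape_routes_alt (adj : List (String × List String)) (rev_adj : List (String × List String)) (cancer_mechs : List String) (inhibited_targets : List String) (essential_genes : List String) (max_depth : Int) : List (List String) :=
  let adjd := PySem.Dict.mk adj
  let sources := PySem.Set.diff (PySem.Set.ofList essential_genes) inhibited_targets
  let fuel := (adj.flatMap (fun p => p.2)).length + 1
  sources.foldl (fun routes source =>
    let r := pvBfsB adjd inhibited_targets max_depth fuel
      (PySem.Set.add PySem.Set.empty source) PySem.Dict.empty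
      (PySem.Dict.empty.insert source 1) [source] []
    r.2.2.foldl (fun acc eff => acc ++ [pvWalk r.2.1 source r.1.length eff [eff]]) routes) []

-- ===== PRECONDITION & SPEC =====
-- A raises no exception; Pre_ only states that the set-typed arguments (inhibited_targets,
-- essential_genes) are valid encodings of Python sets, i.e. lists of distinct elements
-- (each element occurs exactly 1 time) — it excludes no well-formed input.
def Pre_count_escape_routes (adj : List (String × List String)) (rev_adj : List (String × List String)) (cancer_mechs : List String) (inhibited_targets : List String) (essential_genes : List String) (max_depth : Int) : Prop :=
  (∀ x ∈ inhibited_targets, inhibited_targets.count x = 1) ∧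
  (∀ x ∈ essential_genes, essential_genes.count x = 1)
instance (adj : List (String × List String)) (rev_adj : List (String × List String)) (cancer_mechs : List String) (inhibited_targets : List String) (essential_genes : List String) (max_depth : Int) : Decidable (Pre_count_escape_routes adj rev_adj cancer_mechs inhibited_targets essential_genes max_depth) := by unfold Pre_count_escape_routes; infer_instance

-- Concrete example input on which an escape route exists:
-- TP53 -> BCL2 (effector) with MDM2 inhibited; routes = [["TP53","BCL2"]].
def pvWitness_count_escape_routes : (List (String × List String)) × (List (String × List String)) × List String × List String × List String × Int :=
  ([("TP53", ["MDM2", "BCL2"]), ("MDM2", ["MYC"])], [], [], ["MDM2"], ["TP53"], 4)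

def Spec_count_escape_routes (adj : List (String × List String)) (rev_adj : List (String × List String)) (cancer_mechs : List String) (inhibited_targets : List String) (essential_genes : List String) (max_depth : Int) (out : List (List String)) : Prop := out = count_escape_routes_alt adj rev_adj cancer_mechs inhibited_targets essential_genes max_depth
instance (adj : List (String × List String)) (rev_adj : List (String × List String)) (cancer_mechs : List String) (inhibited_targets : List String) (essential_genes : List String) (max_depth : Int) (out : List (List String)) : Decidable (Spec_count_escape_routes adj rev_adj cancer_mechs inhibited_targets essential_genes max_depth out) := by unfold Spec_count_escape_routes; infer_instance

-- ===== CLAIM (what is proved, stated in full; the proofs are below) =====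
def Claim_equal_count_escape_routes : Prop := ∀ (adj : List (String × List String)) (rev_adj : List (String × List String)) (cancer_mechs : List String) (inhibited_targets : List String) (essential_genes : List String) (max_depth : Int), Dom_count_escape_routes adj rev_adj cancer_mechs inhibited_targets essential_genes max_depth → Pre_count_escape_routes adj rev_adj cancer_mechs inhibited_targets essential_genes max_depth → Spec_count_escape_routes adj rev_adj cancer_mechs inhibited_targets essential_genes max_depth (count_escape_routes adj rev_adj cancer_mechs inhibited_targets essential_genes max_depth)

-- ===== LEMMAS AND PROOFS =====

/-- `pvReach parent source n p`: walking parent pointers from `n` reaches `source`,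
and `p` is the corresponding source-to-`n` path. -/
inductive pvReach (parent : PySem.Dict String String) (source : String) : String → List String → Prop
  | src : pvReach parent source source [source]
  | step {n p pth} : parent.get? n = some p → n ≠ source → pvReach parent source p pth →
      pvReach parent source n (pth ++ [n])

/-- The invariant tying a node in B's structures to the explicit path A carries for it. -/
def pvChainOK (parent : PySem.Dict String String) (source : String) (visited : List String)
    (n : String) (p : List String) : Prop :=
  pvReach parent source n p ∧ p.Nodup ∧ ∀ x ∈ p, x ∈ visited

theorem pvReach_getLast? {parent : PySem.Dict String String} {source n : String} {p : List String}
    (h : pvReach parent source n p) : p.getLast? = some n := by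
  induction h with
  | src => rfl
  | step _ _ _ _ => simp

theorem pvReach_self_mem {parent : PySem.Dict String String} {source n : String} {p : List String}
    (h : pvReach parent source n p) : n ∈ p := by
  have := pvReach_getLast? h
  exact List.mem_of_getLast? this

theorem pvReach_insert {parent : PySem.Dict String String} {source n : String} {p : List String}
    {visited : List String} {k : String} (h : pvReach parent source n p) :
    (∀ x ∈ p, x ∈ visited) → k ∉ visited → ∀ v : String,
      pvReach (parent.insert k v) source n p := by
  induction h with
  | src => intro _ _ _; exact pvReach.src
  | @step m q pth hget hne hr ih =>
    intro hsub hk v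
    refine pvReach.step ?_ hne (ih (fun x hx => hsub x (List.mem_append_left _ hx)) hk v)
    have hmem : m ∈ pth ++ [m] := List.mem_append_right _ (by simp)
    have hnk : m ≠ k := fun he => hk (he ▸ hsub m hmem)
    rw [PySem.Dict.get?_insert, if_neg hnk]
    exact hget

theorem pvChainOK_insert {parent : PySem.Dict String String} {source : String}
    {visited : List String} {n : String} {p : List String}
    (h : pvChainOK parent source visited n p) {k : String} (hk : k ∉ visited) (v : String) :
    pvChainOK (parent.insert k v) source visited n p :=
  ⟨pvReach_insert h.1 h.2.2 hk v, h.2.1, h.2.2⟩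

theorem pvChainOK_mono {parent : PySem.Dict String String} {source : String}
    {visited visited' : List String} {n : String} {p : List String}
    (h : pvChainOK parent source visited n p) (hsub : ∀ x ∈ visited, x ∈ visited') :
    pvChainOK parent source visited' n p :=
  ⟨h.1, h.2.1, fun x hx => hsub x (h.2.2 x hx)⟩

theorem pvWalk_spec {parent : PySem.Dict String String} {source n : String} {p : List String}
    (h : pvReach parent source n p) :
    ∀ (acc : List String) (fuel : Nat), p.length ≤ fuel →
      pvWalk parent source fuel n acc = p.dropLast ++ acc.reverse := by
  induction h with
  | src =>
    intro acc fuel hf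
    match fuel, hf with
    | 0, hf => simp at hf
    | fuel+1, _ => simp [pvWalk]
  | @step m q pth hget hne hr ih =>
    intro acc fuel hf
    match fuel, hf with
    | 0, hf => simp at hf
    | fuel+1, hf =>
      have hq : pth.getLast? = some q := pvReach_getLast? hr
      have hne' : (m == source) = false := by simp [hne]
      have hlen : pth.length ≤ fuel := by
        simp only [List.length_append, List.length_cons, List.length_nil] at hf; omega
      have hpth : pth.dropLast ++ [q] = pth := by
        cases pth with
        | nil => simp at hq
        | cons a t =>
          have hlast : (a :: t).getLast (by simp) = q :=
            (List.getLast_eq_iff_getLast?_eq_some _).2 hq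
          rw [← hlast]; exact List.dropLast_concat_getLast _
      simp only [pvWalk, hne', hget]
      rw [ih (acc ++ [q]) fuel hlen, List.dropLast_concat, ← hpth, List.append_assoc]
      simp

theorem pvWalk_reconstruct {parent : PySem.Dict String String} {source n : String}
    {p visited : List String} (h : pvChainOK parent source visited n p)
    (_hnd : visited.Nodup) :
    pvWalk parent source visited.length n [n] = p := by
  have hlen : p.length ≤ visited.length :=
    (List.subperm_of_subset h.2.1 (fun x hx => h.2.2 x hx)).length_le
  have := pvWalk_spec h.1 [n] visited.length hlen
  rw [this]
  have hl : p.getLast? = some n := pvReach_getLast? h.1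
  cases p with
  | nil => simp at hl
  | cons a t =>
    have : (a :: t).getLast (by simp) = n := (List.getLast_eq_iff_getLast?_eq_some _).2 hl
    rw [List.reverse_singleton, ← this]
    exact List.dropLast_concat_getLast _

theorem pvFold_equiv (inh : List String) (source node : String) (path : List String) (d : Int)
    (ns : List String) :
    ∀ (visited : PySem.Set String) (parent : PySem.Dict String String) (depth : PySem.Dict String Int)
      (qA assoc : List (String × List String)) (routes0 : List (List String)),
    source ∈ visited → visited.Nodup →
    pvChainOK parent source visited node path →
    d = (path.length : Int) →
    (∀ np ∈ qA, pvChainOK parent source visited np.1 np.2 ∧ depth.getD np.1 0 = (np.2.length : Int)) →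
    (∀ np ∈ assoc, pvChainOK parent source visited np.1 np.2) →
    ∃ (visited' : PySem.Set String) (parent' : PySem.Dict String String)
      (depth' : PySem.Dict String Int) (qA' assoc' : List (String × List String)),
      ns.foldl (pvStepA inh path) (visited, qA, routes0 ++ assoc.map (fun np => np.2))
        = (visited', qA', routes0 ++ assoc'.map (fun np => np.2)) ∧
      ns.foldl (pvStepB inh node d) (visited, parent, depth, qA.map (fun np => np.1), assoc.map (fun np => np.1))
        = (visited', parent', depth', qA'.map (fun np => np.1), assoc'.map (fun np => np.1)) ∧
      source ∈ visited' ∧ visited'.Nodup ∧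
      (∀ x ∈ visited, x ∈ visited') ∧
      (∀ np ∈ qA', pvChainOK parent' source visited' np.1 np.2 ∧ depth'.getD np.1 0 = (np.2.length : Int)) ∧
      (∀ np ∈ assoc', pvChainOK parent' source visited' np.1 np.2) := by
  induction ns with
  | nil =>
    intro visited parent depth qA assoc routes0 hsrc hnd hpath hd hq ha
    exact ⟨visited, parent, depth, qA, assoc, rfl, rfl, hsrc, hnd, fun _ hx => hx, hq, ha⟩
  | cons nb ns ih =>
    intro visited parent depth qA assoc routes0 hsrc hnd hpath hd hq ha
    simp only [List.foldl_cons]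
    by_cases hinh : nb ∈ inh
    · have hA : pvStepA inh path (visited, qA, routes0 ++ assoc.map (fun np => np.2)) nb
          = (visited, qA, routes0 ++ assoc.map (fun np => np.2)) := by
        simp [pvStepA, hinh]
      have hB : pvStepB inh node d
          (visited, parent, depth, qA.map (fun np => np.1), assoc.map (fun np => np.1)) nb
          = (visited, parent, depth, qA.map (fun np => np.1), assoc.map (fun np => np.1)) := by
        simp [pvStepB, hinh]
      rw [hA, hB]
      exact ih visited parent depth qA assoc routes0 hsrc hnd hpath hd hq ha
    · by_cases hvis : nb ∈ visited
      · have hA : pvStepA inh path (visited, qA, routes0 ++ assoc.map (fun np => np.2)) nb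
            = (visited, qA, routes0 ++ assoc.map (fun np => np.2)) := by
          simp [pvStepA, hinh, hvis]
        have hB : pvStepB inh node d
            (visited, parent, depth, qA.map (fun np => np.1), assoc.map (fun np => np.1)) nb
            = (visited, parent, depth, qA.map (fun np => np.1), assoc.map (fun np => np.1)) := by
          simp [pvStepB, hinh, hvis]
        rw [hA, hB]
        exact ih visited parent depth qA assoc routes0 hsrc hnd hpath hd hq ha
      · have hnb : nb ∉ visited := hvis
        have hsub1 : ∀ x ∈ visited, x ∈ PySem.Set.add visited nb :=
          fun x hx => (PySem.Set.mem_add _ _ _).2 (Or.inl hx)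
        have hsrc1 : source ∈ PySem.Set.add visited nb := hsub1 source hsrc
        have hnd1 : (PySem.Set.add visited nb).Nodup := PySem.Set.nodup_add _ _ hnd
        have hnbs : nb ≠ source := fun he => hnb (he ▸ hsrc)
        have hpath1 : pvChainOK (parent.insert nb node) source (PySem.Set.add visited nb) node path :=
          pvChainOK_mono (pvChainOK_insert hpath hnb node) hsub1
        have hq1 : ∀ np ∈ qA, pvChainOK (parent.insert nb node) source (PySem.Set.add visited nb) np.1 np.2 ∧
            (depth.insert nb (d + 1)).getD np.1 0 = (np.2.length : Int) := by
          intro np hnp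
          obtain ⟨hok, hdep⟩ := hq np hnp
          have hne : np.1 ≠ nb := fun he => hnb (he ▸ hok.2.2 np.1 (pvReach_self_mem hok.1))
          exact ⟨pvChainOK_mono (pvChainOK_insert hok hnb node) hsub1,
            by rw [PySem.Dict.getD_insert, if_neg hne]; exact hdep⟩
        have ha1 : ∀ np ∈ assoc, pvChainOK (parent.insert nb node) source (PySem.Set.add visited nb) np.1 np.2 :=
          fun np hnp => pvChainOK_mono (pvChainOK_insert (ha np hnp) hnb node) hsub1
        have hnbpath : nb ∉ path := fun hmem => hnb (hpath.2.2 nb hmem)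
        have hnew : pvChainOK (parent.insert nb node) source (PySem.Set.add visited nb) nb (path ++ [nb]) := by
          refine ⟨pvReach.step (PySem.Dict.get?_insert_self _ _ _) hnbs hpath1.1, ?_, ?_⟩
          · rw [List.nodup_append]
            refine ⟨hpath.2.1, List.nodup_singleton _, fun a ha' b hb => ?_⟩
            simp only [List.mem_singleton] at hb
            subst hb
            exact fun he => hnbpath (he ▸ ha')
          · intro x hx
            rcases List.mem_append.1 hx with hx | hx
            · exact hsub1 x (hpath.2.2 x hx)
            · simp only [List.mem_singleton] at hx
              exact hx ▸ (PySem.Set.mem_add _ _ _).2 (Or.inr rfl)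
        have hnewd : (depth.insert nb (d + 1)).getD nb 0 = ((path ++ [nb]).length : Int) := by
          rw [PySem.Dict.getD_insert_self, hd]
          simp
        by_cases heff : nb ∈ pvEffectorsUnion
        · have hA : pvStepA inh path (visited, qA, routes0 ++ assoc.map (fun np => np.2)) nb
              = (PySem.Set.add visited nb, qA,
                 routes0 ++ (assoc ++ [(nb, path ++ [nb])]).map (fun np => np.2)) := by
            simp [pvStepA, hinh, hvis, heff]
          have hB : pvStepB inh node d
              (visited, parent, depth, qA.map (fun np => np.1), assoc.map (fun np => np.1)) nb
              = (PySem.Set.add visited nb, parent.insert nb node, depth.insert nb (d + 1),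
                 qA.map (fun np => np.1), (assoc ++ [(nb, path ++ [nb])]).map (fun np => np.1)) := by
            simp [pvStepB, hinh, hvis, heff]
          rw [hA, hB]
          obtain ⟨v', p', d', q', a', hA', hB', h1, h2, h3, h4, h5⟩ :=
            ih (PySem.Set.add visited nb) (parent.insert nb node) (depth.insert nb (d + 1)) qA
              (assoc ++ [(nb, path ++ [nb])]) routes0 hsrc1 hnd1 hpath1 hd hq1
              (by intro np hnp
                  rcases List.mem_append.1 hnp with hnp | hnp
                  · exact ha1 np hnp
                  · simp only [List.mem_singleton] at hnp
                    exact hnp ▸ hnew)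
          exact ⟨v', p', d', q', a', hA', hB', h1, h2,
            fun x hx => h3 x (hsub1 x hx), h4, h5⟩
        · have hA : pvStepA inh path (visited, qA, routes0 ++ assoc.map (fun np => np.2)) nb
              = (PySem.Set.add visited nb, qA ++ [(nb, path ++ [nb])],
                 routes0 ++ assoc.map (fun np => np.2)) := by
            simp [pvStepA, hinh, hvis, heff]
          have hB : pvStepB inh node d
              (visited, parent, depth, qA.map (fun np => np.1), assoc.map (fun np => np.1)) nb
              = (PySem.Set.add visited nb, parent.insert nb node, depth.insert nb (d + 1),
                 (qA ++ [(nb, path ++ [nb])]).map (fun np => np.1), assoc.map (fun np => np.1)) := by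
            simp [pvStepB, hinh, hvis, heff]
          rw [hA, hB]
          obtain ⟨v', p', d', q', a', hA', hB', h1, h2, h3, h4, h5⟩ :=
            ih (PySem.Set.add visited nb) (parent.insert nb node) (depth.insert nb (d + 1))
              (qA ++ [(nb, path ++ [nb])]) assoc routes0 hsrc1 hnd1 hpath1 hd
              (by intro np hnp
                  rcases List.mem_append.1 hnp with hnp | hnp
                  · exact hq1 np hnp
                  · simp only [List.mem_singleton] at hnp
                    exact hnp ▸ ⟨hnew, hnewd⟩)
              ha1
          exact ⟨v', p', d', q', a', hA', hB', h1, h2,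
            fun x hx => h3 x (hsub1 x hx), h4, h5⟩

theorem pvBfs_equiv (adjd : PySem.Dict String (List String)) (inh : List String) (md : Int)
    (source : String) :
    ∀ (fuel : Nat) (visited : PySem.Set String) (parent : PySem.Dict String String)
      (depth : PySem.Dict String Int) (qA assoc : List (String × List String))
      (routes0 : List (List String)),
    source ∈ visited → visited.Nodup →
    (∀ np ∈ qA, pvChainOK parent source visited np.1 np.2 ∧ depth.getD np.1 0 = (np.2.length : Int)) →
    (∀ np ∈ assoc, pvChainOK parent source visited np.1 np.2) →
    ∃ (visited' : PySem.Set String) (parent' : PySem.Dict String String)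
      (assoc' : List (String × List String)),
      pvBfsA adjd inh md fuel visited qA (routes0 ++ assoc.map (fun np => np.2))
        = routes0 ++ assoc'.map (fun np => np.2) ∧
      pvBfsB adjd inh md fuel visited parent depth (qA.map (fun np => np.1)) (assoc.map (fun np => np.1))
        = (visited', parent', assoc'.map (fun np => np.1)) ∧
      visited'.Nodup ∧
      (∀ np ∈ assoc', pvChainOK parent' source visited' np.1 np.2) := by
  intro fuel
  induction fuel with
  | zero =>
    intro visited parent depth qA assoc routes0 _ hnd _ ha
    exact ⟨visited, parent, assoc, rfl, rfl, hnd, ha⟩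
  | succ fuel ih =>
    intro visited parent depth qA assoc routes0 hsrc hnd hq ha
    match qA with
    | [] => exact ⟨visited, parent, assoc, rfl, rfl, hnd, ha⟩
    | (node, path) :: rest =>
      obtain ⟨hok, hdep⟩ := hq (node, path) (by simp)
      have hrest : ∀ np ∈ rest, pvChainOK parent source visited np.1 np.2 ∧
          depth.getD np.1 0 = (np.2.length : Int) := fun np hnp => hq np (by simp [hnp])
      simp only [List.map_cons, pvBfsA, pvBfsB, hdep]
      by_cases hg : (path.length : Int) > md
      · simp only [if_pos hg]
        exact ih visited parent depth rest assoc routes0 hsrc hnd hrest ha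
      · simp only [if_neg hg]
        obtain ⟨v1, p1, d1, q1, a1, hA, hB, h1, h2, _, h4, h5⟩ :=
          pvFold_equiv inh source node path ((path.length : Int)) (adjd.getD node [])
            visited parent depth rest assoc routes0 hsrc hnd hok rfl hrest ha
        rw [hA, hB]
        exact ih v1 p1 d1 q1 a1 routes0 h1 h2 h4 h5

theorem pvRecon_fold {parent : PySem.Dict String String} {source : String}
    {visited : List String} (hnd : visited.Nodup) :
    ∀ (assoc : List (String × List String)) (routes : List (List String)),
    (∀ np ∈ assoc, pvChainOK parent source visited np.1 np.2) →
    (assoc.map (fun np => np.1)).foldl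
        (fun acc eff => acc ++ [pvWalk parent source visited.length eff [eff]]) routes
      = routes ++ assoc.map (fun np => np.2) := by
  intro assoc
  induction assoc with
  | nil => intro routes _; simp
  | cons hd tl ih =>
    intro routes hall
    simp only [List.map_cons, List.foldl_cons]
    rw [pvWalk_reconstruct (hall hd (by simp)) hnd, ih (routes ++ [hd.2])
      (fun np hnp => hall np (by simp [hnp]))]
    simp

theorem pvPer_source (adjd : PySem.Dict String (List String)) (inh : List String) (md : Int)
    (fuel : Nat) (source : String) (routes : List (List String)) :
    pvBfsA adjd inh md fuel (PySem.Set.add PySem.Set.empty source) [(source, [source])] routes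
      = (let r := pvBfsB adjd inh md fuel (PySem.Set.add PySem.Set.empty source)
            PySem.Dict.empty (PySem.Dict.empty.insert source 1) [source] [];
         r.2.2.foldl (fun acc eff => acc ++ [pvWalk r.2.1 source r.1.length eff [eff]]) routes) := by
  have hinit : ∀ np ∈ [((source : String), [source])],
      pvChainOK PySem.Dict.empty source (PySem.Set.add PySem.Set.empty source) np.1 np.2 ∧
      (PySem.Dict.empty.insert source 1).getD np.1 0 = ((np.2.length : Nat) : Int) := by
    intro np hnp
    simp only [List.mem_singleton] at hnp
    subst hnp
    refine ⟨⟨pvReach.src, by simp, by simp [PySem.Set.add, PySem.Set.empty]⟩, ?_⟩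
    simp [PySem.Dict.getD_insert_self]
  obtain ⟨vis', par', assoc', hA, hB, hnd, hok⟩ :=
    pvBfs_equiv adjd inh md source fuel (PySem.Set.add PySem.Set.empty source)
      PySem.Dict.empty (PySem.Dict.empty.insert source 1) [(source, [source])] [] routes
      (by simp [PySem.Set.add, PySem.Set.empty]) (by simp [PySem.Set.add, PySem.Set.empty])
      hinit (by simp)
  simp only [List.map_nil, List.append_nil] at hA hB
  simp only [List.map_cons, List.map_nil] at hB
  rw [hA, hB]
  exact (pvRecon_fold hnd assoc' routes hok).symm

theorem pvSources_fold (adjd : PySem.Dict String (List String)) (inh : List String) (md : Int)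
    (fuel : Nat) (sources : List String) :
    ∀ routes : List (List String),
    sources.foldl (fun routes source =>
        pvBfsA adjd inh md fuel (PySem.Set.add PySem.Set.empty source) [(source, [source])] routes)
      routes
    = sources.foldl (fun routes source =>
        let r := pvBfsB adjd inh md fuel (PySem.Set.add PySem.Set.empty source)
          PySem.Dict.empty (PySem.Dict.empty.insert source 1) [source] []
        r.2.2.foldl (fun acc eff => acc ++ [pvWalk r.2.1 source r.1.length eff [eff]]) routes)
      routes := by
  induction sources with
  | nil => intro routes; rfl
  | cons s t ih =>
    intro routes
    simp only [List.foldl_cons]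
    rw [pvPer_source, ih]


-- ===== VERDICT (by name: the statement is the Claim_ definition above) =====
theorem count_escape_routes_spec : Claim_equal_count_escape_routes := by
  intro adj rev_adj cancer_mechs inhibited_targets essential_genes max_depth _ _
  unfold Spec_count_escape_routes count_escape_routes count_escape_routes_alt
  exact pvSources_fold _ _ _ _ _ []
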